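-- pv_equiv track=rewrite | github.com/hidsts/Server | GSM_7bit.py | bit_7_to_8
-- ===== SOURCE A (Python) =====
-- def bit_7_to_8(lists):
--     result = []
--     i = 0
--     while len(lists) - 1 > 0:
--         current_byte = lists[i]
--
--         if current_byte:
--             current_len = len(current_byte)
--
--             next_byte = lists[i + 1]
--
--             next_len = len(next_byte)
--
--             need = 8 - current_len
--
--             if need < next_len:
--                 tmp = next_byte[:next_len - need]
--
--                 next_byte = next_byte[next_len - need:]
--
--             else:
--                 tmp = ''
--
--             current_byte = next_byte + current_byte
--
--             result.append(current_byte)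
--
--             lists[i + 1] = tmp
--
--             del lists[i]
--         else:
--             del lists[i]
--             continue
--     if lists[i]:
--         result.append(lists[i])
--
--     return result
-- ===== SOURCE B (Python) =====
-- def bit_7_to_8(lists):
--     # Single forward pass with a carry variable; no list mutation (A destroys `lists` in place, B only reads it).
--     result = []
--     carry = lists[0]
--     for nxt in lists[1:]:
--         if not carry:
--             carry = nxt
--             continue
--         need = 8 - len(carry)
--         over = len(nxt) - need
--         if 0 < over:
--             result.append(nxt[over:] + carry)
--             carry = nxt[:over]
--         else:
--             result.append(nxt + carry)
--             carry = ''
--     if carry: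
--         result.append(carry)
--     return result
-- ===== Notes on version B (the rewrite author's own statement) =====
-- stated objective: faster
-- what changed: Replaced A's mutate-in-place while loop (repeated del lists[0], which shifts the whole list each iteration) by a single forward pass over lists[1:] with a carry variable and no mutation.
-- outside the precondition, e.g. on bit_7_to_8([]): A raises IndexError, B raises IndexError
import Mathlib
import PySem

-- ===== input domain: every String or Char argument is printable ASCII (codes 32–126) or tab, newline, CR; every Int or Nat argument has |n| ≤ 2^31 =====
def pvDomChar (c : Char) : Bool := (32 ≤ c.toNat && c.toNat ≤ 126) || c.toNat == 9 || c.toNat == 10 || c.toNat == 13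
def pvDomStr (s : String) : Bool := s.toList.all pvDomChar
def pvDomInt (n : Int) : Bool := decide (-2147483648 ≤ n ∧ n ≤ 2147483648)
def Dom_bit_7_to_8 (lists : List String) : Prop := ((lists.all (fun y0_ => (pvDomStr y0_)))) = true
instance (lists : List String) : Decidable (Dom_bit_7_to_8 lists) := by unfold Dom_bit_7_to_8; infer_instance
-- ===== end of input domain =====

-- B replaces A's quadratic delete-from-front loop by one forward pass with a carry variable
-- (faster, asymptotic); equivalence is about the RETURN value only — A destroys `lists` in place, B does not.


-- ===== PORT A =====
-- A's while loop: i is always 0, so each iteration looks at the first two elements of the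
-- mutable list and either deletes the (falsy) head or combines head and second, writing the
-- spill back into position 1 and deleting position 0.  We model the mutable list as the first
-- argument, the accumulated `result` as the second; strings are handled as List Char (PySem).
def bit7LoopA : List (List Char) → List (List Char) → List (List Char) × List (List Char)
  | c :: n :: rest, result =>
    if c ≠ [] then
      let need : Int := 8 - (c.length : Int)
      let nl : Int := (n.length : Int)
      let tmp := if need < nl then PySem.List.slice n none (some (nl - need)) else []
      let n' := if need < nl then PySem.List.slice n (some (nl - need)) none else n
      bit7LoopA (tmp :: rest) (result ++ [n' ++ c])
    else
      bit7LoopA (n :: rest) result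
  | ls, result => (ls, result)
termination_by ls _ => ls.length
decreasing_by all_goals simp

def bit_7_to_8 (lists : List String) : List String :=
  let st := bit7LoopA (lists.map String.toList) []
  -- final `if lists[i]: result.append(lists[i])`; pyGet? = none is Python's IndexError
  -- (only on lists = [], excluded by Pre_)
  (match PySem.List.pyGet? st.1 0 with
   | some s => if s ≠ [] then st.2 ++ [s] else st.2
   | none => st.2).map (fun s => String.ofList s)

-- ===== PORT B =====
-- B: one pass ov the tail with a carry string and an output accumulator.
def bit7Step (st : List Char × List (List Char)) (nxt : List Char) : List Char × List (List Char) :=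
  if st.1 = [] then (nxt, st.2)
  else
    let need : Int := 8 - (st.1.length : Int)
    let ov : Int := (nxt.length : Int) - need
    if 0 < ov then
      (PySem.List.slice nxt none (some ov),
       st.2 ++ [PySem.List.slice nxt (some ov) none ++ st.1])
    else
      ([], st.2 ++ [nxt ++ st.1])

def bit_7_to_8_alt (lists : List String) : List String :=
  match lists.map String.toList with
  | [] => []   -- Python B raises IndexError here (outside Pre_)
  | c :: rest =>
    let fin := rest.foldl bit7Step (c, [])
    (if fin.1 ≠ [] then fin.2 ++ [fin.1] else fin.2).map (fun s => String.ofList s)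

-- ===== PRECONDITION & SPEC =====
-- Pre_ excludes only lists = [], on which Python A raises IndexError at the final lists[i].
def Pre_bit_7_to_8 (lists : List String) : Prop := lists ≠ []
instance (lists : List String) : Decidable (Pre_bit_7_to_8 lists) := by unfold Pre_bit_7_to_8; infer_instance
def pvWitness_bit_7_to_8 : List String := ["0110100", "1011001", "1"]

def Spec_bit_7_to_8 (lists : List String) (out : List String) : Prop := out = bit_7_to_8_alt lists
instance (lists : List String) (out : List String) : Decidable (Spec_bit_7_to_8 lists out) := by unfold Spec_bit_7_to_8; infer_instance

-- ===== CLAIM (what is proved, stated in full; the proofs are below) =====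
def Claim_equal_bit_7_to_8 : Prop := ∀ (lists : List String), Dom_bit_7_to_8 lists → Pre_bit_7_to_8 lists → Spec_bit_7_to_8 lists (bit_7_to_8 lists)

-- ===== LEMMAS AND PROOFS =====

-- A's loop on a nonempty working list computes exactly B's fold, with the final carry
-- as the single surviving element.
theorem bit7LoopA_eq_foldl (rest : List (List Char)) :
    ∀ (c : List Char) (result : List (List Char)),
    bit7LoopA (c :: rest) result =
      (fun p => ([p.1], p.2)) (rest.foldl bit7Step (c, result)) := by
  induction rest with
  | nil => intro c result; rw [bit7LoopA.eq_def]; simp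
  | cons n rs ih =>
    intro c result
    rw [bit7LoopA.eq_def]
    by_cases hc : c = []
    · simpa [hc, bit7Step] using ih n result
    · simp only [hc, ne_eq, not_false_eq_true, if_true, List.foldl_cons]
      rw [ih]
      have hstep : bit7Step (c, result) n =
          ((if (8 : Int) - (c.length : Int) < (n.length : Int) then
              PySem.List.slice n none (some ((n.length : Int) - (8 - (c.length : Int)))) else []),
           result ++ [(if (8 : Int) - (c.length : Int) < (n.length : Int) then
              PySem.List.slice n (some ((n.length : Int) - (8 - (c.length : Int)))) none else n) ++ c]) := by
        simp only [bit7Step, hc, if_neg, ite_not, not_false_eq_true, if_false]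
        split_ifs <;> first | rfl | omega
      rw [hstep]

-- ===== VERDICT (by name: the statement is the Claim_ definition above) =====
theorem bit_7_to_8_spec : Claim_equal_bit_7_to_8 := by
  intro lists _ hpre
  unfold Spec_bit_7_to_8 bit_7_to_8 bit_7_to_8_alt
  cases lists with
  | nil => exact absurd rfl hpre
  | cons x xs =>
    simp only [List.map_cons, bit7LoopA_eq_foldl]
    cases h : (List.map String.toList xs).foldl bit7Step (x.toList, []) with
    | mk carry res =>
      simp only [PySem.List.pyGet?, PySem.List.pyIdx?]
      split <;> simp_all [PySem.List.pyGet?, PySem.List.pyIdx?]
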